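-- pv_equiv track=rewrite | github.com/neptune-ai/neptune-fetcher | src/neptune_fetcher/alpha/attribute_filter.py | _union_options
-- ===== SOURCE A (Python) =====
-- from typing import (
--     Callable,
--     Literal,
--     Optional,
--     Union,
-- )
--
-- def _union_options(options: list[Optional[list[str]]]) -> Optional[list[str]]:
--     result = None
--
--     for option in options:
--         if option is not None:
--             if result is None:
--                 result = []
--             result.extend(option)
--
--     return result
-- ===== SOURCE B (Python) =====
-- def _union_options(options):
--     # Divide and conquer: split in half, union each half recursively, merge.
--     if len(options) >= 2:
--         mid = len(options) // 2
--         left = _union_options(options[:mid])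
--         right = _union_options(options[mid:])
--         if left is None:
--             return right
--         if right is None:
--             return left
--         return left + right
--     if not options:
--         return None
--     o = options[0]
--     return None if o is None else list(o)
-- ===== Notes on version B (the rewrite author's own statement) =====
-- stated objective: alternative
-- what changed: Replaces A's single left-to-right loop with a lazily created accumulator by a divide-and-conquer recursion: split the list in half, union each half, and merge the two optional results.
import Mathlib
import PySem

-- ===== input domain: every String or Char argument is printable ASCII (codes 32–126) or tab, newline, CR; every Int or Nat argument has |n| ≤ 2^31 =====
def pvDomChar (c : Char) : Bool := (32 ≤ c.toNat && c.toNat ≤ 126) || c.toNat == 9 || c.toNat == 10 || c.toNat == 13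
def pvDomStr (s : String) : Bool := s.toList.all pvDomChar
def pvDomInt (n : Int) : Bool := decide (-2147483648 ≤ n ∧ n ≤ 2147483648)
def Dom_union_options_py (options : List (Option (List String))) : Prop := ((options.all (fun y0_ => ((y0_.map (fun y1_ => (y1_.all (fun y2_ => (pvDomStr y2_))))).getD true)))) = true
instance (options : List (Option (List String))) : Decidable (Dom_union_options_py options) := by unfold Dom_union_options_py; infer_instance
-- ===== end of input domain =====

-- B replaces A's single left-to-right lazy-accumulator loop by a divide-and-conquer
-- recursion (split in half, union each half, merge); alternative decomposition.

-- ===== PORT A =====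
def union_options_py (options : List (Option (List String))) : Option (List String) :=
  options.foldl (fun result option =>
    match option with
    | none => result
    | some opt =>
      match result with
      | none => some ([] ++ opt)
      | some r => some (r ++ opt)) none

-- ===== PORT B =====
-- merge of the two recursive results (the three-branch if-chain in Source B)
def mergeUnion (left right : Option (List String)) : Option (List String) :=
  match left with
  | none => right
  | some l =>
    match right with
    | none => some l
    | some r => some (l ++ r)

def union_options_py_alt (options : List (Option (List String))) : Option (List String) :=
  if _h : 2 ≤ options.length then
    let mid := options.length / 2
    mergeUnion (union_options_py_alt (options.take mid)) (union_options_py_alt (options.drop mid))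
  else
    match options with
    | [] => none
    | o :: _ => o   -- Python: None if o is None else list(o) — a copy, same value
termination_by options.length
decreasing_by
  · simp only [List.length_take]; omega
  · simp only [List.length_drop]; omega

-- ===== PRECONDITION & SPEC =====
def Spec_union_options_py (options : List (Option (List String))) (out : Option (List String)) : Prop := out = union_options_py_alt options
instance (options : List (Option (List String))) (out : Option (List String)) : Decidable (Spec_union_options_py options out) := by unfold Spec_union_options_py; infer_instance

-- ===== CLAIM (what is proved, stated in full; the proofs are below) =====
def Claim_equal_union_options_py : Prop := ∀ (options : List (Option (List String))), Dom_union_options_py options → Spec_union_options_py options (union_options_py options)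

-- ===== LEMMAS AND PROOFS =====

-- canonical form both ports are reduced to
def unionSpec (options : List (Option (List String))) : Option (List String) :=
  if options.all (fun o => o.isNone) then none
  else some ((options.filterMap id).flatten)

theorem filterMap_nil_of_all_none (xs : List (Option (List String)))
    (h : xs.all (fun o => o.isNone) = true) : xs.filterMap id = [] := by
  rw [List.filterMap_eq_nil_iff]
  intro a ha
  have h2 := List.all_eq_true.mp h a ha
  cases a <;> simp_all

theorem unionSpec_append (xs ys : List (Option (List String))) :
    unionSpec (xs ++ ys) = mergeUnion (unionSpec xs) (unionSpec ys) := by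
  unfold unionSpec mergeUnion
  by_cases hx : xs.all (fun o => o.isNone) <;>
  by_cases hy : ys.all (fun o => o.isNone) <;>
    simp only [hx, hy, if_true, List.all_append, Bool.and_eq_true,
      List.filterMap_append, List.flatten_append]
  · simp
  · rw [filterMap_nil_of_all_none xs hx]; simp
  · rw [filterMap_nil_of_all_none ys hy]; simp
  · simp

theorem alt_char (options : List (Option (List String))) :
    union_options_py_alt options = unionSpec options := by
  induction options using union_options_py_alt.induct with
  | case1 options h mid ihl ihr =>
    rw [union_options_py_alt]
    simp only [dif_pos h]
    rw [ihl, ihr, ← unionSpec_append, List.take_append_drop]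
  | case2 h =>
    simp [union_options_py_alt, unionSpec]
  | case3 o tl h =>
    have htl : tl = [] := List.eq_nil_of_length_eq_zero
      (by simp only [List.length_cons] at h; omega)
    subst htl
    cases o <;> simp [union_options_py_alt, unionSpec]

theorem foldl_some (options : List (Option (List String))) (r : List String) :
    options.foldl (fun result option =>
      match option with
      | none => result
      | some opt =>
        match result with
        | none => some ([] ++ opt)
        | some r => some (r ++ opt)) (some r) = some (r ++ (options.filterMap id).flatten) := by
  induction options generalizing r with
  | nil => simp
  | cons o os ih =>
    cases o with
    | none =>
      simp only [List.foldl_cons, List.filterMap_cons]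
      exact ih r
    | some l =>
      simp only [List.foldl_cons, List.filterMap_cons, List.flatten_cons, id_eq]
      rw [ih (r ++ l)]
      simp

theorem union_main (options : List (Option (List String))) :
    union_options_py options = union_options_py_alt options := by
  rw [alt_char]
  unfold union_options_py unionSpec
  induction options with
  | nil => simp
  | cons o os ih =>
    cases o with
    | none =>
      simp only [List.foldl_cons, List.all_cons, Option.isNone_none, Bool.true_and,
        List.filterMap_cons]
      exact ih
    | some l =>
      simp only [List.foldl_cons, List.all_cons, Option.isNone_some, Bool.false_and,
        List.filterMap_cons, List.flatten_cons, if_neg (by simp : ¬ (false = true)), id_eq]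
      rw [foldl_some]
      simp

-- ===== VERDICT (by name: the statement is the Claim_ definition above) =====
theorem union_options_py_spec : Claim_equal_union_options_py := by
  intro options _
  unfold Spec_union_options_py
  exact union_main options
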